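-- pv_equiv track=rewrite | github.com/highfestiva/life | Impuzzable/script/asc.py | _drop_empty_head_tail
-- ===== SOURCE A (Python) =====
-- def _drop_empty_head_tail(chars):
-- 	o,chars = None,list(chars)
-- 	while o != chars:
-- 		o = chars
-- 		if not list(filter(lambda s:s.strip(),chars[0])):
-- 			chars = chars[1:]
-- 		if not list(filter(lambda s:s.strip(),chars[-1])):
-- 			chars = chars[:-1]
-- 	return chars
-- ===== SOURCE B (Python) =====
-- def _drop_empty_head_tail(chars):
--     chars = list(chars)
--     nonempty = [k for k, row in enumerate(chars) if any(s.strip() for s in row)]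
--     return chars[nonempty[0]:nonempty[-1] + 1]
-- ===== Notes on version B (the rewrite author's own statement) =====
-- stated objective: simpler
-- what changed: Replaces A's fixed-point loop of repeated head/tail whitespace-row trims with one enumeration pass collecting indices of non-whitespace rows followed by a single slice from the first to the last such index.
import Mathlib
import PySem

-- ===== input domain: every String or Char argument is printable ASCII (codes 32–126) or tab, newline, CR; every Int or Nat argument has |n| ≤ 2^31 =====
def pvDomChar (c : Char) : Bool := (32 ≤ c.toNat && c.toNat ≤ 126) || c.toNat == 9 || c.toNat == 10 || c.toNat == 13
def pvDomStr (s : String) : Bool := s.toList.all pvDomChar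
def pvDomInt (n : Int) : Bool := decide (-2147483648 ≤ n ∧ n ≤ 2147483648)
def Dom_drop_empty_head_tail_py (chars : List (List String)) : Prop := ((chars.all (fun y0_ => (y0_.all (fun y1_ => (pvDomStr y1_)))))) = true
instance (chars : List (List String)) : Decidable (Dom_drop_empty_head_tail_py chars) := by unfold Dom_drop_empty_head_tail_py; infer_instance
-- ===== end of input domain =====

-- B replaces A's fixed-point loop of repeated head/tail trimming with one index-collecting pass and a single slice (simpler).


-- ===== PORT A =====
-- `not list(filter(lambda s: s.strip(), row))` — the filtered list is empty
def pvBlankRow (row : List String) : Bool := (row.filter (fun s => PySem.Str.strip s != "")).isEmpty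

-- first statement of the loop body: `if not ...(chars[0]): chars = chars[1:]`
-- (chars[0] on an empty list raises IndexError in Python; the `headD []` default is
-- reached only outside Pre_, where A raises)
def pvStep1 (chars : List (List String)) : List (List String) :=
  if pvBlankRow (chars.headD []) then chars.drop 1 else chars

-- second statement of the loop body: `if not ...(chars[-1]): chars = chars[:-1]`
-- (same remark for chars[-1] / `getLastD []`)
def pvStep2 (c1 : List (List String)) : List (List String) :=
  if pvBlankRow (c1.getLastD []) then c1.dropLast else c1

-- one execution of the while-loop body
def pvStep (chars : List (List String)) : List (List String) := pvStep2 (pvStep1 chars)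

theorem pvStep_length_lt (chars : List (List String)) (h : pvStep chars ≠ chars) :
    (pvStep chars).length < chars.length := by
  unfold pvStep pvStep1 pvStep2 at *
  split_ifs at * with h1 h2 h2 <;>
    cases chars with
    | nil => simp_all
    | cons x xs =>
        simp only [List.length_drop, List.length_dropLast, List.length_cons] at *
        first
        | omega
        | (by_cases hx : xs = [] <;> simp_all)

-- `while o != chars: o = chars; <body>` — iterate the body to its fixed point
def pvALoop (chars : List (List String)) : List (List String) :=
  if _h : pvStep chars = chars then chars else pvALoop (pvStep chars)
termination_by chars.length
decreasing_by exact pvStep_length_lt chars _h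

def drop_empty_head_tail_py (chars : List (List String)) : List (List String) :=
  pvALoop chars

-- ===== PORT B =====
-- `any(s.strip() for s in row)`
def pvNonblankRow (row : List String) : Bool := row.any (fun s => PySem.Str.strip s != "")

-- nonempty = [k for k, row in enumerate(chars) if any(s.strip() for s in row)]
-- return chars[nonempty[0]:nonempty[-1] + 1]
-- (nonempty[0] / nonempty[-1] raise IndexError in Python when nonempty == []; the
-- `headD 0` / `getLastD 0` defaults are reached only outside Pre_, where B raises)
def drop_empty_head_tail_py_alt (chars : List (List String)) : List (List String) :=
  let ne := ((PySem.List.enumerate chars 0).filter (fun p => pvNonblankRow p.2)).map (·.1)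
  PySem.List.slice chars (some (ne.headD 0)) (some (ne.getLastD 0 + 1))

-- ===== PRECONDITION & SPEC =====
-- Pre_ excludes exactly the inputs with no non-whitespace cell (including []),
-- on which both A and B raise IndexError.
def Pre_drop_empty_head_tail_py (chars : List (List String)) : Prop :=
  chars.any (fun row => pvNonblankRow row) = true
instance (chars : List (List String)) : Decidable (Pre_drop_empty_head_tail_py chars) := by
  unfold Pre_drop_empty_head_tail_py; infer_instance

def pvWitness_drop_empty_head_tail_py : List (List String) := [["x"]]

def Spec_drop_empty_head_tail_py (chars : List (List String)) (out : List (List String)) : Prop := out = drop_empty_head_tail_py_alt chars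
instance (chars : List (List String)) (out : List (List String)) : Decidable (Spec_drop_empty_head_tail_py chars out) := by unfold Spec_drop_empty_head_tail_py; infer_instance

-- ===== CLAIM (what is proved, stated in full; the proofs are below) =====
def Claim_equal_drop_empty_head_tail_py : Prop := ∀ (chars : List (List String)), Dom_drop_empty_head_tail_py chars → Pre_drop_empty_head_tail_py chars → Spec_drop_empty_head_tail_py chars (drop_empty_head_tail_py chars)

-- ===== LEMMAS AND PROOFS =====

-- A's emptiness test (filtered list empty) is the negation of B's (any non-blank cell)
theorem pvBlank_not (row : List String) : pvBlankRow row = !pvNonblankRow row := by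
  induction row with
  | nil => rfl
  | cons s t ih =>
      simp only [pvBlankRow, pvNonblankRow, List.filter_cons, List.any_cons] at *
      cases h : (PySem.Str.strip s != "") <;> simp [ih]

theorem step1_blank (w : List String) (l : List (List String)) (hw : pvNonblankRow w = false) :
    pvStep1 (w :: l) = l := by simp [pvStep1, pvBlank_not, hw]

theorem step1_nonblank (w : List String) (l : List (List String)) (hw : pvNonblankRow w = true) :
    pvStep1 (w :: l) = w :: l := by simp [pvStep1, pvBlank_not, hw]

theorem step2_concat (l : List (List String)) (y : List String) (hy : pvNonblankRow y = false) :
    pvStep2 (l ++ [y]) = l := by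
  simp [pvStep2, pvBlank_not, hy]

theorem step2_keep (l : List (List String)) (z : List String) (hz : l.getLast? = some z)
    (h : pvNonblankRow z = true) : pvStep2 l = l := by
  simp [pvStep2, List.getLastD_eq_getLast?, hz, pvBlank_not, h]

theorem getLast?_left (l c : List (List String)) (z : List String)
    (hz : c.getLast? = some z) : (l ++ c).getLast? = some z := by
  rw [List.getLast?_append]; simp [hz]

-- A's loop, on a blank prefix `a`, a core `x :: t` with non-blank first and last rows,
-- and a blank suffix `b`, converges to the core
theorem lemA (n : Nat) : ∀ (a t b : List (List String)) (x : List String),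
    (a ++ (x :: t) ++ b).length ≤ n →
    a.all (fun r => !pvNonblankRow r) = true → b.all (fun r => !pvNonblankRow r) = true →
    pvNonblankRow x = true →
    ∀ (z : List String), (x :: t).getLast? = some z → pvNonblankRow z = true →
    pvALoop (a ++ (x :: t) ++ b) = x :: t := by
  induction n with
  | zero => intro a t b x hlen _ _ _ _ _ _; simp at hlen
  | succ n ih =>
      intro a t b x hlen ha hb hhx z hz hhz
      rcases b.eq_nil_or_concat with rfl | ⟨b', y, rfl⟩
      · rcases a with _ | ⟨w, a'⟩
        · have hstep : pvStep ([] ++ (x :: t) ++ []) = [] ++ (x :: t) ++ [] := by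
            unfold pvStep
            rw [show ([] ++ (x :: t) ++ [] : List (List String)) = x :: t by simp,
              step1_nonblank _ _ hhx, step2_keep _ z hz hhz]
          rw [pvALoop, dif_pos hstep]; simp
        · simp only [List.all_cons, Bool.and_eq_true, Bool.not_eq_true'] at ha
          have hstep : pvStep ((w :: a') ++ (x :: t) ++ []) = a' ++ (x :: t) ++ [] := by
            unfold pvStep
            rw [show ((w :: a') ++ (x :: t) ++ [] : List (List String))
                  = w :: (a' ++ (x :: t) ++ []) by simp,
              step1_blank _ _ ha.1,
              step2_keep _ z (by rw [show (a' ++ (x :: t) ++ [] : List (List String))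
                  = a' ++ (x :: t) by simp]; exact getLast?_left a' _ z hz) hhz]
          have hne : pvStep ((w :: a') ++ (x :: t) ++ []) ≠ (w :: a') ++ (x :: t) ++ [] := by
            rw [hstep]; intro hcon
            have := congrArg List.length hcon; simp at this
          rw [pvALoop, dif_neg hne, hstep]
          exact ih a' t [] x (by simp at hlen ⊢; omega) ha.2 (by simp) hhx z hz hhz
      · rw [List.concat_eq_append] at hb hlen ⊢
        simp only [List.all_append, List.all_cons, List.all_nil, Bool.and_eq_true,
          Bool.not_eq_true'] at hb
        rcases a with _ | ⟨w, a'⟩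
        · have hstep : pvStep ([] ++ (x :: t) ++ (b' ++ [y])) = [] ++ (x :: t) ++ b' := by
            unfold pvStep
            rw [show ([] ++ (x :: t) ++ (b' ++ [y]) : List (List String))
                  = x :: (t ++ (b' ++ [y])) by simp,
              step1_nonblank _ _ hhx,
              show (x :: (t ++ (b' ++ [y])) : List (List String))
                  = ((x :: t) ++ b') ++ [y] by simp,
              step2_concat _ _ hb.2.1]
            simp
          have hne : pvStep ([] ++ (x :: t) ++ (b' ++ [y])) ≠ [] ++ (x :: t) ++ (b' ++ [y]) := by
            rw [hstep]; intro hcon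
            have := congrArg List.length hcon; simp at this
          rw [pvALoop, dif_neg hne, hstep]
          exact ih [] t b' x (by simp at hlen ⊢; omega) (by simp) hb.1 hhx z hz hhz
        · simp only [List.all_cons, Bool.and_eq_true, Bool.not_eq_true'] at ha
          have hstep : pvStep ((w :: a') ++ (x :: t) ++ (b' ++ [y]))
              = a' ++ (x :: t) ++ b' := by
            unfold pvStep
            rw [show ((w :: a') ++ (x :: t) ++ (b' ++ [y]) : List (List String))
                  = w :: (a' ++ (x :: t) ++ (b' ++ [y])) by simp,
              step1_blank _ _ ha.1,
              show (a' ++ (x :: t) ++ (b' ++ [y]) : List (List String))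
                  = (a' ++ (x :: t) ++ b') ++ [y] by simp,
              step2_concat _ _ hb.2.1]
          have hne : pvStep ((w :: a') ++ (x :: t) ++ (b' ++ [y]))
              ≠ (w :: a') ++ (x :: t) ++ (b' ++ [y]) := by
            rw [hstep]; intro hcon
            have := congrArg List.length hcon; simp at this; omega
          rw [pvALoop, dif_neg hne, hstep]
          exact ih a' t b' x (by simp at hlen ⊢; omega) ha.2 hb.1 hhx z hz hhz

theorem filt_blank (a : List (List String)) (s : Int) (ha : a.all (fun r => !pvNonblankRow r)) :
    (PySem.List.enumerate a s).filter (fun p => pvNonblankRow p.2) = [] := by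
  induction a generalizing s with
  | nil => simp [PySem.List.enumerate_nil]
  | cons x t ih =>
      simp only [List.all_cons, Bool.and_eq_true, Bool.not_eq_true'] at ha
      simp [PySem.List.enumerate_cons, ha.1, ih _ ha.2]

-- B, on the same decomposition, slices out exactly the core
theorem lemB (a c b : List (List String)) (ha : a.all (fun r => !pvNonblankRow r))
    (hb : b.all (fun r => !pvNonblankRow r)) (x : List String) (hx : c.head? = some x)
    (hhx : pvNonblankRow x = true) (z : List String) (hz : c.getLast? = some z)
    (hhz : pvNonblankRow z = true) :
    drop_empty_head_tail_py_alt (a ++ c ++ b) = c := by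
  unfold drop_empty_head_tail_py_alt
  have hmid : ((PySem.List.enumerate (a ++ c ++ b) 0).filter (fun p => pvNonblankRow p.2))
      = (PySem.List.enumerate c ((0:Int) + (a.length:Int))).filter (fun p => pvNonblankRow p.2) := by
    rw [PySem.List.enumerate_append, PySem.List.enumerate_append, List.filter_append,
      List.filter_append, filt_blank a _ ha, filt_blank b _ hb]
    simp
  obtain ⟨c', rfl⟩ := List.getLast?_eq_some_iff.mp hz
  have hF : ((PySem.List.enumerate (c' ++ [z]) ((0:Int) + (a.length:Int))).filter (fun p => pvNonblankRow p.2))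
      = ((PySem.List.enumerate c' ((0:Int) + (a.length:Int))).filter (fun p => pvNonblankRow p.2))
        ++ [((0:Int) + (a.length:Int) + c'.length, z)] := by
    rw [PySem.List.enumerate_append, List.filter_append]
    simp [PySem.List.enumerate_cons, hhz]
  dsimp only
  rw [hmid, hF, List.map_append]
  simp only [List.map_cons, List.map_nil]
  have hlast : ((((PySem.List.enumerate c' ((0:Int) + (a.length:Int))).filter (fun p => pvNonblankRow p.2))).map (·.1)
      ++ [((0:Int) + (a.length:Int) + (c'.length:Int))]).getLastD 0 = (a.length : Int) + c'.length := by
    simp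
  have hhead : ((((PySem.List.enumerate c' ((0:Int) + (a.length:Int))).filter (fun p => pvNonblankRow p.2))).map (·.1)
      ++ [((0:Int) + (a.length:Int) + (c'.length:Int))]).headD 0 = (a.length : Int) := by
    cases c' with
    | nil => simp [PySem.List.enumerate_nil]
    | cons x0 t =>
        have hx0 : x0 = x := by simpa using hx
        subst hx0
        simp [PySem.List.enumerate_cons, hhx]
  rw [hlast, hhead]
  have hb2 : (a.length : Int) + (c'.length : Int) + 1
      = (a.length : Int) + ((c'.length + 1 : Nat) : Int) := by push_cast; ring
  rw [hb2, PySem.List.slice_natCast_add, List.append_assoc, List.drop_left,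
      List.take_left' (by simp)]

theorem getLast?_suffix {α : Type} (l₂ l : List α) (h : l₂.IsSuffix l) (hne : l₂ ≠ []) :
    l.getLast? = l₂.getLast? := by
  obtain ⟨t, rfl⟩ := h
  rw [List.getLast?_append]
  cases hc : l₂.getLast? with
  | none => exact absurd (List.getLast?_eq_none_iff.mp hc) hne
  | some z => simp

-- every list with some row failing p splits into a p-prefix, a core whose first and
-- last rows fail p, and a p-suffix
theorem decomp0 (p : List String → Bool) (chars : List (List String))
    (hp : ∃ r ∈ chars, p r = false) :
    ∃ (a c b : List (List String)),
      chars = a ++ c ++ b ∧ a.all p = true ∧ b.all p = true ∧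
      (∃ x, c.head? = some x ∧ p x = false) ∧
      (∃ z, c.getLast? = some z ∧ p z = false) := by
  set c0 := chars.dropWhile p with hc0
  have hc0ne : c0 ≠ [] := by
    rw [hc0]; rw [Ne, List.dropWhile_eq_nil_iff]
    push Not
    obtain ⟨r, hr, hnr⟩ := hp
    exact ⟨r, hr, by simp [hnr]⟩
  have hx : p (c0.head hc0ne) = false := by
    exact List.head_dropWhile_not p hc0ne
  set c1 := c0.reverse.dropWhile p with hc1
  have hc1ne : c1 ≠ [] := by
    rw [hc1, Ne, List.dropWhile_eq_nil_iff]
    push Not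
    exact ⟨c0.head hc0ne, by simp [List.head_mem], by simp [hx]⟩
  have hz : p (c1.head hc1ne) = false := by
    exact List.head_dropWhile_not p hc1ne
  refine ⟨chars.takeWhile p, c1.reverse, (c0.reverse.takeWhile p).reverse, ?_, ?_, ?_, ?_, ?_⟩
  · conv_lhs => rw [← List.takeWhile_append_dropWhile (p := p) (l := chars)]
    rw [← hc0, List.append_assoc]
    congr 1
    have h3 : c0.reverse = c0.reverse.takeWhile p ++ c1 := by
      rw [hc1, List.takeWhile_append_dropWhile]
    have := congrArg List.reverse h3
    simpa [List.reverse_append] using this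
  · simp only [List.all_eq_true]
    exact fun r hr => List.mem_takeWhile_imp (p := p) hr
  · simp only [List.all_reverse, List.all_eq_true]
    exact fun r hr => List.mem_takeWhile_imp (p := p) hr
  · refine ⟨c0.head hc0ne, ?_, hx⟩
    rw [List.head?_reverse]
    have hsuf : c1.IsSuffix c0.reverse := by rw [hc1]; exact List.dropWhile_suffix p
    rw [← getLast?_suffix c1 c0.reverse hsuf hc1ne, List.getLast?_reverse]
    exact List.head?_eq_some_head hc0ne
  · refine ⟨c1.head hc1ne, ?_, hz⟩
    rw [List.getLast?_reverse]
    exact List.head?_eq_some_head hc1ne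

-- ===== VERDICT (by name: the statement is the Claim_ definition above) =====
theorem drop_empty_head_tail_py_spec : Claim_equal_drop_empty_head_tail_py := by
  intro chars _ hp
  have hp' : ∃ r ∈ chars, (fun r => !pvNonblankRow r) r = false := by
    unfold Pre_drop_empty_head_tail_py at hp
    obtain ⟨r, hr, hnr⟩ := List.any_eq_true.mp hp
    exact ⟨r, hr, by simp [hnr]⟩
  obtain ⟨a, c, b, rfl, ha, hb, ⟨x, hx, hhx⟩, ⟨z, hz, hhz⟩⟩ :=
    decomp0 (fun r => !pvNonblankRow r) chars hp'
  have hhx' : pvNonblankRow x = true := by simpa using hhx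
  have hhz' : pvNonblankRow z = true := by simpa using hhz
  obtain ⟨t, rfl⟩ : ∃ t, c = x :: t := by
    cases c with
    | nil => simp at hx
    | cons c0 ct =>
        have hc0x : c0 = x := by simpa using hx
        exact ⟨ct, by rw [hc0x]⟩
  unfold Spec_drop_empty_head_tail_py drop_empty_head_tail_py
  rw [lemA (a ++ (x :: t) ++ b).length a t b x le_rfl ha hb hhx' z hz hhz',
    lemB a (x :: t) b ha hb x hx hhx' z hz hhz']
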